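-- pv_equiv track=rewrite | github.com/Stoyan83/SoftUni-Studying | Fundamentals with Python/08.Text Processing/Exercise/10✶_winning_ticket.py | is_winning
-- ===== SOURCE A (Python) =====
-- def is_winning(ticket):
--     if not len(ticket) == 20:
--         return "invalid ticket"
--     left_half = ticket[:10]
--     right_half = ticket[10:]
--     winning_chars = ['@', '#', '$', '^']
--     for ch in winning_chars:
--         for repetition in range(10, 5, -1):
--             ch_repetition = ch * repetition
--             if ch_repetition in left_half and ch_repetition in right_half:
--                 if repetition == 10:
--                     return f'ticket "{ticket}" - {len(ch_repetition)}{ch} Jackpot!'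
--                 elif 6 <= repetition <= 9:
--                    return f'ticket "{ticket}" - {len(ch_repetition)}{ch}'
--     return f'ticket "{ticket}" - no match'
-- ===== SOURCE B (Python) =====
-- def _longest_run(s, ch):
--     best = cur = 0
--     for c in s:
--         cur = cur + 1 if c == ch else 0
--         if cur > best:
--             best = cur
--     return best
--
--
-- def is_winning(ticket):
--     if len(ticket) != 20:
--         return "invalid ticket"
--     left = ticket[:10]
--     right = ticket[10:]
--     for ch in '@#$^':
--         m = min(_longest_run(left, ch), _longest_run(right, ch))
--         if m == 10:
--             return f'ticket "{ticket}" - {m}{ch} Jackpot!'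
--         if 6 <= m:
--             return f'ticket "{ticket}" - {m}{ch}'
--     return f'ticket "{ticket}" - no match'
-- ===== Notes on version B (the rewrite author's own statement) =====
-- stated objective: alternative
-- what changed: A builds ch*rep strings and does substring membership tests for rep = 10..6 on both halves; B makes one linear run-length scan per half per winning char and branches on m = min(left_run, right_run).
import Mathlib
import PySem

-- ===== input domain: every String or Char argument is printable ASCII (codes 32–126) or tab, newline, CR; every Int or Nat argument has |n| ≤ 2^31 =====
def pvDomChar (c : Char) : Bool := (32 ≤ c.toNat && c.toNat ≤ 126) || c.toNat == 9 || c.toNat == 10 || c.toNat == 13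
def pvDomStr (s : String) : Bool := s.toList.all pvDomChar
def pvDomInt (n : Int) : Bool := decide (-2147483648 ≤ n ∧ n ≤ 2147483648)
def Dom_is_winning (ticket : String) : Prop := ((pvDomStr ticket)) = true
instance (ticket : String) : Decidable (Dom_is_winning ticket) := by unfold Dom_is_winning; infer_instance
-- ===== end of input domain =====

-- B replaces A's "ch*rep in half" substring probes for rep = 10..6 by one linear
-- longest-run scan per half per winning char, branching on m = min of the two runs
-- (alternative decomposition; same exact output strings).

-- ===== PORT A =====
-- inner loop 'for repetition in range(10, 5, -1)' with its early returns
def pvInnerA (t left right : List Char) (ch : Char) : List Int → Option (List Char)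
  | [] => none
  | rep :: rest =>
      let chRep := List.replicate rep.toNat ch
      if PySem.Chars.isIn chRep left && PySem.Chars.isIn chRep right then
        if rep = 10 then
          some ("ticket \"".toList ++ t ++ "\" - ".toList
            ++ (PySem.Int.toStr (chRep.length : Int)).toList ++ [ch] ++ " Jackpot!".toList)
        else if 6 ≤ rep ∧ rep ≤ 9 then
          some ("ticket \"".toList ++ t ++ "\" - ".toList
            ++ (PySem.Int.toStr (chRep.length : Int)).toList ++ [ch])
        else pvInnerA t left right ch rest
      else pvInnerA t left right ch rest

-- outer loop 'for ch in winning_chars' with its early returns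
def pvOuterA (t left right : List Char) : List Char → Option (List Char)
  | [] => none
  | ch :: rest =>
      match pvInnerA t left right ch (PySem.List.pyRange 10 5 (-1)) with
      | some r => some r
      | none => pvOuterA t left right rest

def is_winning (ticket : String) : String :=
  let t := ticket.toList
  if ¬ (t.length = 20) then "invalid ticket"
  else
    let left := PySem.List.slice t none (some 10)
    let right := PySem.List.slice t (some 10) none
    match pvOuterA t left right ['@', '#', '$', '^'] with
    | some r => String.ofList r
    | none => String.ofList ("ticket \"".toList ++ t ++ "\" - no match".toList)

-- ===== PORT B =====
-- loop body of _longest_run: update (current run, best run) with the next char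
def pvRunStep (ch : Char) (p : Nat × Nat) (c : Char) : Nat × Nat :=
  let cur := if c = ch then p.1 + 1 else 0
  (cur, if p.2 < cur then cur else p.2)

-- _longest_run(s, ch): single pass keeping (current run, best run)
def pvLongestRun (s : List Char) (ch : Char) : Nat :=
  (s.foldl (pvRunStep ch) (0, 0)).2

-- 'for ch in "@#$^"' with the min-of-runs branch
def pvLoopB (t left right : List Char) : List Char → List Char
  | [] => "ticket \"".toList ++ t ++ "\" - no match".toList
  | ch :: rest =>
      let m := min (pvLongestRun left ch) (pvLongestRun right ch)
      if m = 10 then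
        "ticket \"".toList ++ t ++ "\" - ".toList
          ++ (PySem.Int.toStr (m : Int)).toList ++ [ch] ++ " Jackpot!".toList
      else if 6 ≤ m then
        "ticket \"".toList ++ t ++ "\" - ".toList
          ++ (PySem.Int.toStr (m : Int)).toList ++ [ch]
      else pvLoopB t left right rest

def is_winning_alt (ticket : String) : String :=
  let t := ticket.toList
  if t.length ≠ 20 then "invalid ticket"
  else
    let left := PySem.List.slice t none (some 10)
    let right := PySem.List.slice t (some 10) none
    String.ofList (pvLoopB t left right "@#$^".toList)

-- ===== PRECONDITION & SPEC =====
def Spec_is_winning (ticket : String) (out : String) : Prop := out = is_winning_alt ticket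
instance (ticket : String) (out : String) : Decidable (Spec_is_winning ticket out) := by unfold Spec_is_winning; infer_instance

-- ===== CLAIM (what is proved, stated in full; the proofs are below) =====
def Claim_equal_is_winning : Prop := ∀ (ticket : String), Dom_is_winning ticket → Spec_is_winning ticket (is_winning ticket)

-- ===== LEMMAS AND PROOFS =====

-- length of the leading run of c
def pvLead (c : Char) : List Char → Nat
  | [] => 0
  | x :: xs => if x = c then pvLead c xs + 1 else 0

-- longest run of c anywhere in the list
def pvMR (c : Char) : List Char → Nat
  | [] => 0
  | x :: xs => if x = c then max (pvLead c xs + 1) (pvMR c xs) else pvMR c xs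

theorem pvLead_le_pvMR (c : Char) (s : List Char) : pvLead c s ≤ pvMR c s := by
  induction s with
  | nil => simp [pvLead, pvMR]
  | cons x xs ih =>
    by_cases h : x = c <;> simp [pvLead, pvMR, h] <;> omega

theorem pvMR_le_length (c : Char) (s : List Char) : pvMR c s ≤ s.length := by
  induction s with
  | nil => simp [pvMR]
  | cons x xs ih =>
    have hl : pvLead c xs ≤ xs.length := by
      clear ih
      induction xs with
      | nil => simp [pvLead]
      | cons y ys ihy => by_cases h : y = c <;> simp [pvLead, h] <;> omega
    by_cases h : x = c <;> simp [pvMR, h] <;> omega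

theorem pvFold_spec (ch : Char) (s : List Char) : ∀ (cur best : Nat),
    (s.foldl (pvRunStep ch) (cur, best)).2
    = max best (max (if pvLead ch s = 0 then 0 else cur + pvLead ch s) (pvMR ch s)) := by
  induction s with
  | nil => intro cur best; simp [pvLead, pvMR]
  | cons x xs ih =>
    intro cur best
    have hL := pvLead_le_pvMR ch xs
    rw [List.foldl_cons]
    by_cases h : x = ch
    · have hstep : pvRunStep ch (cur, best) x
          = (cur + 1, if best < cur + 1 then cur + 1 else best) := by
        simp [pvRunStep, h]
      have h1 : pvLead ch (x :: xs) = pvLead ch xs + 1 := by simp [pvLead, h]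
      have h2 : pvMR ch (x :: xs) = max (pvLead ch xs + 1) (pvMR ch xs) := by simp [pvMR, h]
      rw [hstep, ih, h1, h2]
      simp only [Nat.max_def]
      split_ifs <;> first | contradiction | omega
    · have hstep : pvRunStep ch (cur, best) x = (0, best) := by
        simp [pvRunStep, h]
      have h1 : pvLead ch (x :: xs) = 0 := by simp [pvLead, h]
      have h2 : pvMR ch (x :: xs) = pvMR ch xs := by simp [pvMR, h]
      rw [hstep, ih, h1, h2]
      simp only [Nat.max_def]
      split_ifs <;> first | contradiction | omega

theorem pvLongestRun_eq (s : List Char) (ch : Char) : pvLongestRun s ch = pvMR ch s := by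
  have h := pvFold_spec ch s 0 0
  have hL := pvLead_le_pvMR ch s
  unfold pvLongestRun
  rw [h, Nat.max_def, Nat.max_def]
  split_ifs <;> omega

theorem pvReplicate_prefix (c : Char) (n : Nat) (s : List Char) :
    List.replicate n c <+: s ↔ n ≤ pvLead c s := by
  induction n generalizing s with
  | zero => simp
  | succ m ih =>
    cases s with
    | nil => simp [pvLead, List.replicate_succ]
    | cons x xs =>
      simp only [List.replicate_succ, List.cons_prefix_cons, pvLead]
      by_cases h : x = c
      · simp [h, ih]
      · simp [h, Ne.symm h]

theorem pvReplicate_infix (c : Char) (n : Nat) (s : List Char) :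
    List.replicate n c <:+: s ↔ n ≤ pvMR c s := by
  induction s with
  | nil => cases n <;> simp [pvMR, List.replicate_succ]
  | cons x xs ih =>
    cases n with
    | zero => simp [List.replicate]
    | succ m =>
      rw [List.infix_cons_iff, pvReplicate_prefix, ih]
      by_cases h : x = c
      · have h1 : pvLead c (x :: xs) = pvLead c xs + 1 := by simp [pvLead, h]
        have h2 : pvMR c (x :: xs) = max (pvLead c xs + 1) (pvMR c xs) := by simp [pvMR, h]
        rw [h1, h2]
        omega
      · have h1 : pvLead c (x :: xs) = 0 := by simp [pvLead, h]
        have h2 : pvMR c (x :: xs) = pvMR c xs := by simp [pvMR, h]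
        rw [h1, h2]
        omega

theorem pvIsIn_replicate (c : Char) (n : Nat) (s : List Char) :
    PySem.Chars.isIn (List.replicate n c) s = decide (n ≤ pvMR c s) := by
  rcases Bool.eq_false_or_eq_true (PySem.Chars.isIn (List.replicate n c) s) with h | h <;> rw [h]
  · have hn := (PySem.Chars.isIn_iff_infix _ _).1 h
    rw [pvReplicate_infix] at hn
    simp [hn]
  · have hn := (PySem.Chars.isIn_eq_false_iff _ _).1 h
    rw [pvReplicate_infix] at hn
    simp [hn]

theorem pvRange_val : PySem.List.pyRange 10 5 (-1) = [10, 9, 8, 7, 6] := by decide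

-- the inner loop of A agrees with B's min-of-runs branch for one char
theorem pvInner_eq (t left right : List Char) (ch : Char)
    (hl : pvMR ch left ≤ 10) (hr : pvMR ch right ≤ 10) :
    pvInnerA t left right ch (PySem.List.pyRange 10 5 (-1))
    = (let m := min (pvLongestRun left ch) (pvLongestRun right ch)
       if m = 10 then
         some ("ticket \"".toList ++ t ++ "\" - ".toList
           ++ (PySem.Int.toStr (m : Int)).toList ++ [ch] ++ " Jackpot!".toList)
       else if 6 ≤ m then
         some ("ticket \"".toList ++ t ++ "\" - ".toList
           ++ (PySem.Int.toStr (m : Int)).toList ++ [ch])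
       else none) := by
  rw [pvRange_val]
  simp only [pvInnerA, pvIsIn_replicate, pvLongestRun_eq, Bool.and_eq_true,
    decide_eq_true_eq, ← le_min_iff]
  have hm : min (pvMR ch left) (pvMR ch right) ≤ 10 := le_trans (min_le_left _ _) hl
  set m := min (pvMR ch left) (pvMR ch right) with hmdef
  clear_value m
  interval_cases m <;> norm_num

-- the outer loop of A agrees with B's loop, including the fallback string
theorem pvOuter_eq (t left right : List Char)
    (hl : left.length ≤ 10) (hr : right.length ≤ 10) (cs : List Char) :
    (match pvOuterA t left right cs with
     | some r => r
     | none => "ticket \"".toList ++ t ++ "\" - no match".toList)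
    = pvLoopB t left right cs := by
  induction cs with
  | nil => simp [pvOuterA, pvLoopB]
  | cons ch rest ih =>
    have hml : pvMR ch left ≤ 10 := le_trans (pvMR_le_length ch left) hl
    have hmr : pvMR ch right ≤ 10 := le_trans (pvMR_le_length ch right) hr
    rw [pvLoopB]
    rw [pvOuterA, pvInner_eq t left right ch hml hmr]
    simp only [pvLongestRun_eq]
    set m := min (pvMR ch left) (pvMR ch right) with hm
    by_cases h10 : m = 10
    · simp [h10]
    · by_cases h6 : 6 ≤ m
      · simp [h10, h6]
      · simpa [h10, h6, pvLongestRun_eq] using ih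

-- ===== VERDICT (by name: the statement is the Claim_ definition above) =====
theorem is_winning_spec : Claim_equal_is_winning := by
  intro ticket _
  unfold Spec_is_winning is_winning is_winning_alt
  dsimp only
  by_cases h20 : ticket.toList.length = 20
  · rw [if_neg (not_not_intro h20), if_neg (not_not_intro h20)]
    have hleft : (PySem.List.slice ticket.toList none (some 10)).length ≤ 10 := by
      rw [PySem.List.slice_to ticket.toList (by norm_num)]
      simp
    have hright : (PySem.List.slice ticket.toList (some 10) none).length ≤ 10 := by
      rw [PySem.List.slice_from ticket.toList (by norm_num)]
      simp [h20]
    have hcs : ("@#$^".toList) = ['@', '#', '$', '^'] := by decide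
    rw [hcs]
    rw [← pvOuter_eq ticket.toList (PySem.List.slice ticket.toList none (some 10))
      (PySem.List.slice ticket.toList (some 10) none) hleft hright ['@', '#', '$', '^']]
    cases pvOuterA ticket.toList (PySem.List.slice ticket.toList none (some 10))
      (PySem.List.slice ticket.toList (some 10) none) ['@', '#', '$', '^'] <;> simp
  · rw [if_pos h20, if_pos h20]
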